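-- pv_equiv track=rewrite | github.com/SSW567-GROUPD/MRZ-TESTING | MRTD.py | _fletcher8_check_digit
-- ===== SOURCE A (Python) =====
-- def _fletcher8_check_digit(field):
--     """
--     Compute the Fletcher-8 check digit for a given MRZ field string.
--
--     Uses two 4-bit accumulators with modulus 15 (2^4 - 1).
--     Character value mapping:
--         '0'-'9'  ->  0-9
--         'A'-'Z'  ->  10-35
--         '<'      ->  0
--
--     Returns the check digit as an integer (0-9).
--     """
--     A = 0
--     B = 0
--     for char in field:
--         if char.isdigit():
--             value = int(char)
--         elif char.isalpha():
--             value = ord(char.upper()) - ord('A') + 10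
--         else:
--             value = 0  # '<' and any other filler
--         A = (A + value) % 15
--         B = (B + A) % 15
--     checksum_byte = (B << 4) | A
--     return checksum_byte % 10
-- ===== SOURCE B (Python) =====
-- def _fletcher8_check_digit(field):
--     """Value-map pass plus closed-form accumulators instead of a running recurrence."""
--     def value(ch):
--         if ch.isdigit():
--             return int(ch)
--         if ch.isalpha():
--             return ord(ch.upper()) - ord('A') + 10
--         return 0
--
--     values = [value(ch) for ch in field]
--     n = len(values)
--     A = sum(values) % 15
--     B = sum(v * (n - j) for j, v in enumerate(values)) % 15
--     return ((B << 4) | A) % 10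
-- ===== Notes on version B (the rewrite author's own statement) =====
-- stated objective: alternative
-- what changed: Replaces the step-by-step two-accumulator mod-15 recurrence with a single value-mapping pass followed by two closed-form sums: A = sum(values) % 15 and B = position-weighted sum(v[j]*(n-j)) % 15.
import Mathlib
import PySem

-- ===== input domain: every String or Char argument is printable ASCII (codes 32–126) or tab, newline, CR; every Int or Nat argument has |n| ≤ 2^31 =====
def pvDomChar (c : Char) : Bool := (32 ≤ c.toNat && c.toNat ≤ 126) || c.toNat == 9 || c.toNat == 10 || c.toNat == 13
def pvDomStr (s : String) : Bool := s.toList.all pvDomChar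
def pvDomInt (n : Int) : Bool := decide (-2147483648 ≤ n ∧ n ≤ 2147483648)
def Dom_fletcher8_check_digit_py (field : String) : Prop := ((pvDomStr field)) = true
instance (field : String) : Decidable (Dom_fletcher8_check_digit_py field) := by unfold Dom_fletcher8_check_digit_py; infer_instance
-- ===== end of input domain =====

-- B replaces A's running two-accumulator recurrence by a value-mapping pass plus two
-- closed-form sums (plain sum and position-weighted sum, each taken mod 15): alternative
-- decomposition, same O(n) cost.

-- ===== PORT A =====
-- literal transliteration of A's loop: state (A, B), one step per character
def fletcher8_check_digit_py (field : String) : Int :=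
  let p := field.toList.foldl (fun (p : Int × Int) char =>
    let value : Int :=
      if PySem.Chars.isdigit char then (PySem.Int.ofChars? [char]).getD 0   -- int(char); the branch guarantees a digit, so the default never fires
      else if PySem.Chars.isalpha char then ((PySem.Chars.upperChar char).toNat : Int) - 65 + 10
      else 0
    let A := PySem.Int.mod (p.1 + value) 15
    let B := PySem.Int.mod (p.2 + A) 15
    (A, B)) (0, 0)
  let checksum_byte := PySem.Int.bor (p.2 <<< (4 : Nat)) p.1
  PySem.Int.mod checksum_byte 10

-- ===== PORT B =====
-- B's helper value(ch)
def pvValue (ch : Char) : Int :=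
  if PySem.Chars.isdigit ch then (PySem.Int.ofChars? [ch]).getD 0
  else if PySem.Chars.isalpha ch then ((PySem.Chars.upperChar ch).toNat : Int) - 65 + 10
  else 0

def fletcher8_check_digit_py_alt (field : String) : Int :=
  let values := field.toList.map pvValue
  let n : Int := values.length
  let A := PySem.Int.mod values.sum 15
  let B := PySem.Int.mod ((PySem.List.enumerate values 0).map (fun p => p.2 * (n - p.1))).sum 15
  PySem.Int.mod (PySem.Int.bor (B <<< (4 : Nat)) A) 10

-- ===== PRECONDITION & SPEC =====
def Spec_fletcher8_check_digit_py (field : String) (out : Int) : Prop := out = fletcher8_check_digit_py_alt field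
instance (field : String) (out : Int) : Decidable (Spec_fletcher8_check_digit_py field out) := by unfold Spec_fletcher8_check_digit_py; infer_instance

-- ===== CLAIM (what is proved, stated in full; the proofs are below) =====
def Claim_equal_fletcher8_check_digit_py : Prop := ∀ (field : String), Dom_fletcher8_check_digit_py field → Spec_fletcher8_check_digit_py field (fletcher8_check_digit_py field)

-- ===== LEMMAS AND PROOFS =====

-- structural position-weighted sum: head weighted by the full length, tail recursively
def pvW : List Int → Int
  | [] => 0
  | v :: vs => v * ((vs.length : Int) + 1) + pvW vs

-- B's enumerate-based weighted sum equals pvW (generalised over the enumerate start)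
lemma pvEnumW : ∀ (vs : List Int) (s c : Int), c - s = (vs.length : Int) →
    ((PySem.List.enumerate vs s).map (fun p => p.2 * (c - p.1))).sum = pvW vs := by
  intro vs
  induction vs with
  | nil => intro s c _; simp [PySem.List.enumerate, pvW]
  | cons v vs ih =>
    intro s c h
    simp only [PySem.List.enumerate_cons, List.map_cons, List.sum_cons, pvW]
    rw [ih (s + 1) c (by simp at h ⊢; omega)]
    have : c - s = (vs.length : Int) + 1 := by simp at h; omega
    rw [this]

-- the loop invariant: A's fold from a reduced state computes the two closed forms
lemma pvLoop : ∀ (cs : List Char) (a b : Int), 0 ≤ a → a < 15 → 0 ≤ b → b < 15 →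
    cs.foldl (fun (p : Int × Int) char =>
      let value : Int :=
        if PySem.Chars.isdigit char then (PySem.Int.ofChars? [char]).getD 0
        else if PySem.Chars.isalpha char then ((PySem.Chars.upperChar char).toNat : Int) - 65 + 10
        else 0
      let A := PySem.Int.mod (p.1 + value) 15
      let B := PySem.Int.mod (p.2 + A) 15
      (A, B)) (a, b)
    = ((a + (cs.map pvValue).sum) % 15,
       (b + (cs.length : Int) * a + pvW (cs.map pvValue)) % 15) := by
  intro cs
  induction cs with
  | nil =>
    intro a b ha0 ha hb0 hb
    simp [pvW]
    constructor <;> omega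
  | cons c cs ih =>
    intro a b ha0 ha hb0 hb
    simp only [List.foldl_cons]
    rw [show PySem.Int.mod (a + (if PySem.Chars.isdigit c then (PySem.Int.ofChars? [c]).getD 0
        else if PySem.Chars.isalpha c then ((PySem.Chars.upperChar c).toNat : Int) - 65 + 10
        else 0)) 15 = (a + pvValue c) % 15 from by
      rw [PySem.Int.mod_eq_emod_of_pos (by norm_num)]; rfl]
    rw [show PySem.Int.mod (b + (a + pvValue c) % 15) 15 = (b + (a + pvValue c) % 15) % 15 from
      PySem.Int.mod_eq_emod_of_pos (by norm_num)]
    rw [ih _ _ (Int.emod_nonneg _ (by norm_num)) (Int.emod_lt_of_pos _ (by norm_num))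
              (Int.emod_nonneg _ (by norm_num)) (Int.emod_lt_of_pos _ (by norm_num))]
    set v := pvValue c with hv
    set m := (a + v) % 15 with hmdef
    have hm : Int.ModEq 15 m (a + v) := Int.emod_emod_of_dvd _ dvd_rfl
    rw [Prod.mk.injEq]
    constructor
    · simp only [List.map_cons, List.sum_cons]
      omega
    · simp only [List.map_cons, pvW, List.length_cons, List.length_map]
      have h1 : Int.ModEq 15 ((b + m) % 15 + (cs.length : Int) * m + pvW (cs.map pvValue))
          (b + (a + v) + (cs.length : Int) * (a + v) + pvW (cs.map pvValue)) := by
        exact (((show Int.ModEq 15 ((b + m) % 15) (b + m) from Int.emod_emod_of_dvd _ dvd_rfl).trans ((Int.ModEq.refl b).add hm)).add (hm.mul_left _)).add_right _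
      have := h1
      unfold Int.ModEq at this
      rw [this]
      congr 1
      push_cast
      ring

-- ===== VERDICT (by name: the statement is the Claim_ definition above) =====
theorem fletcher8_check_digit_py_spec : Claim_equal_fletcher8_check_digit_py := by
  intro field _
  unfold Spec_fletcher8_check_digit_py fletcher8_check_digit_py fletcher8_check_digit_py_alt
  simp only
  rw [pvLoop field.toList 0 0 le_rfl (by norm_num) le_rfl (by norm_num)]
  rw [pvEnumW (field.toList.map pvValue) 0 ((field.toList.map pvValue).length : Int) (by simp)]
  rw [PySem.Int.mod_eq_emod_of_pos (b := 15) (by norm_num),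
      PySem.Int.mod_eq_emod_of_pos (b := 15) (by norm_num)]
  norm_num
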